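-- pv_equiv track=rewrite | github.com/xx3nvyxx/challenges | 2008/Practice Problems/A/AlienNumbers.py | sourceToInt
-- ===== SOURCE A (Python) =====
-- def sourceToInt(A, S):
--     base = len(S)
--     l = list()
--     for c in A:
--         l.append(S.index(c))
--     r = 0
--     for i,n in enumerate(reversed(l)):
--         r = r + ((base ** i) * n)
--     return r
-- ===== SOURCE B (Python) =====
-- def sourceToInt(A, S):
--     idx = {}
--     for i, c in enumerate(S):
--         if c not in idx:
--             idx[c] = i
--     base = len(S)
--     r = 0
--     for c in A:
--         r = r * base + idx[c]
--     return r
-- ===== Notes on version B (the rewrite author's own statement) =====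
-- stated objective: faster
-- what changed: Replace the per-character S.index scan and the second pass summing base**i powers with a first-occurrence index dict built once and a single Horner-rule pass over A.
import Mathlib
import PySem

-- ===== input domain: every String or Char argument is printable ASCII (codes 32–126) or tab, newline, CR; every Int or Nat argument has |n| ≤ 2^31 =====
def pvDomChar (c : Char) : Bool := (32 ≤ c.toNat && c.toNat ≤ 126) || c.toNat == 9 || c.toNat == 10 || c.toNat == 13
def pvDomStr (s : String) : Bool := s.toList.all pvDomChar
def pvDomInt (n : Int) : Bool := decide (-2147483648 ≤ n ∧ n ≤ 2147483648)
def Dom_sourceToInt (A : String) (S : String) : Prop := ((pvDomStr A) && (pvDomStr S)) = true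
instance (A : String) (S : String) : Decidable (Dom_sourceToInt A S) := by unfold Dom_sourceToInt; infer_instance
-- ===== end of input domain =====

-- B replaces A's per-character S.index scans and base**i power sums by a first-occurrence
-- index dictionary built once plus a single Horner-rule pass (measured faster, asymptotic).


-- ===== PORT A =====
-- l.append(S.index(c)); S.index(c) raises when c ∉ S — excluded by Pre_, so the
-- total form (index?).getD 0 is exact on Pre_.
def sourceToInt (A : String) (S : String) : Int :=
  let base : Int := PySem.Str.len S
  let l : List Nat :=
    A.toList.foldl (fun l c => l ++ [(PySem.List.index? S.toList c).getD 0]) []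
  (PySem.List.enumerate l.reverse 0).foldl
    (fun r p => r + base ^ p.1.toNat * (p.2 : Int)) 0

-- ===== PORT B =====
-- idx = {} ; for i,c in enumerate(S): if c not in idx: idx[c] = i ; then Horner over A.
-- idx[c] raises KeyError when c ∉ S — excluded by Pre_, so getD 0 is exact on Pre_.
def sourceToInt_alt (A : String) (S : String) : Int :=
  let idx : PySem.Dict Char Int :=
    (PySem.List.enumerate S.toList 0).foldl
      (fun d p => if d.contains p.2 then d else d.insert p.2 p.1) PySem.Dict.empty
  let base : Int := PySem.Str.len S
  A.toList.foldl (fun r c => r * base + idx.getD c 0) 0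

-- ===== PRECONDITION & SPEC =====
-- Pre_ excludes exactly the inputs where A raises ValueError: some character of A absent from S.
def Pre_sourceToInt (A : String) (S : String) : Prop :=
  (A.toList.all (fun c => S.toList.contains c)) = true
instance (A : String) (S : String) : Decidable (Pre_sourceToInt A S) := by
  unfold Pre_sourceToInt; infer_instance
def pvWitness_sourceToInt : String × String := ("101", "01")

def Spec_sourceToInt (A : String) (S : String) (out : Int) : Prop := out = sourceToInt_alt A S
instance (A : String) (S : String) (out : Int) : Decidable (Spec_sourceToInt A S out) := by
  unfold Spec_sourceToInt; infer_instance

-- ===== CLAIM (what is proved, stated in full; the proofs are below) =====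
def Claim_equal_sourceToInt : Prop :=
  ∀ (A : String) (S : String), Dom_sourceToInt A S → Pre_sourceToInt A S →
    Spec_sourceToInt A S (sourceToInt A S)

-- ===== LEMMAS AND PROOFS =====

-- B's dict fold computes the first-occurrence index: PySem.List.index?.
theorem get?_idx_fold (xs : List Char) : ∀ (k : Int) (d : PySem.Dict Char Int) (c : Char),
    ((PySem.List.enumerate xs k).foldl
        (fun d p => if d.contains p.2 then d else d.insert p.2 p.1) d).get? c =
      if d.contains c then d.get? c
      else (PySem.List.index? xs c).map (fun n : Nat => k + n) := by
  induction xs with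
  | nil =>
    intro k d c
    have hn : PySem.List.index? ([] : List Char) c = none :=
      (PySem.List.index?_eq_none_iff _ _).mpr (by simp)
    by_cases hc : d.contains c <;>
      simp_all [PySem.List.enumerate_nil, PySem.Dict.get?_eq_none_iff_contains]
  | cons x t ih =>
    intro k d c
    simp only [PySem.List.enumerate_cons, List.foldl_cons]
    by_cases hx : x = c
    · subst hx
      rw [PySem.List.index?_cons_self]
      by_cases hc : d.contains x
      · simp only [hc, if_true, ih]
      · simp only [hc, Bool.false_eq_true, if_false, ih,
          PySem.Dict.contains_insert_self, if_true, PySem.Dict.get?_insert]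
        simp
    · rw [PySem.List.index?_cons_of_ne t hx]
      have h2 : ¬ (c = x) := fun h => hx h.symm
      by_cases hc : d.contains x
      · simp only [hc, if_true, ih]
        rcases PySem.List.index? t c with _ | n <;>
          simp <;> try ring_nf
      · simp only [hc, Bool.false_eq_true, if_false, ih, PySem.Dict.contains_insert,
          PySem.Dict.get?_insert]
        have h1 : (c == x) = false := by simp [h2]
        simp only [h1, Bool.false_or, if_neg h2]
        rcases PySem.List.index? t c with _ | n <;>
          simp <;> try ring_nf

-- Horner step: appending a last digit.
theorem horner_append (base : Int) (ys : List Nat) (x : Nat) :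
    ((ys ++ [x]).foldl (fun (r : Int) (n : Nat) => r * base + (n : Int)) 0) =
      (ys.foldl (fun (r : Int) (n : Nat) => r * base + (n : Int)) 0) * base + x := by
  rw [List.foldl_append]; rfl

-- A's power-sum over the reversed digit list is the Horner value of the list.
theorem powsum_eq_horner (base : Int) (rs : List Nat) : ∀ (s : Nat) (acc : Int),
    (PySem.List.enumerate rs (s : Int)).foldl
        (fun r p => r + base ^ p.1.toNat * (p.2 : Int)) acc =
      acc + base ^ s * (rs.reverse.foldl (fun (r : Int) (n : Nat) => r * base + (n : Int)) 0) := by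
  induction rs with
  | nil => intro s acc; simp [PySem.List.enumerate_nil]
  | cons x t ih =>
    intro s acc
    rw [PySem.List.enumerate_cons, List.foldl_cons]
    have h1 : ((s : Int) + 1) = ((s + 1 : Nat) : Int) := by push_cast; ring
    rw [h1, ih (s + 1)]
    simp only [List.reverse_cons, horner_append, Int.toNat_natCast]
    ring

theorem sourceToInt_eq_alt (A : String) (S : String) (hpre : Pre_sourceToInt A S) :
    sourceToInt A S = sourceToInt_alt A S := by
  unfold Pre_sourceToInt at hpre
  simp only [sourceToInt, sourceToInt_alt, PySem.List.foldl_append_singleton_eq_map,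
    List.nil_append]
  have hps := powsum_eq_horner (PySem.Str.len S)
      ((A.toList.map (fun c => (PySem.List.index? S.toList c).getD 0)).reverse) 0 0
  simp only [Nat.cast_zero, List.reverse_reverse, pow_zero, one_mul, zero_add] at hps
  rw [hps, List.foldl_map]
  apply PySem.List.foldl_congr_mem
  intro r c hc
  have hmem : c ∈ S.toList := by simpa using List.all_eq_true.mp hpre c hc
  obtain ⟨n, hidx⟩ : ∃ n, PySem.List.index? S.toList c = some n := by
    cases h : PySem.List.index? S.toList c with
    | none => exact absurd ((PySem.List.index?_eq_none_iff _ _).mp h) (by simp [hmem])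
    | some n => exact ⟨n, rfl⟩
  have hD : ((PySem.List.enumerate S.toList 0).foldl
      (fun d p => if d.contains p.2 then d else d.insert p.2 p.1)
      PySem.Dict.empty).getD c 0 = (n : Int) := by
    rw [PySem.Dict.getD_eq_get?_getD, get?_idx_fold, hidx]
    simp
  rw [hD, hidx]
  rfl

-- ===== VERDICT (by name: the statement is the Claim_ definition above) =====
theorem sourceToInt_spec : Claim_equal_sourceToInt := by
  intro A S _ hpre
  exact sourceToInt_eq_alt A S hpre
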